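-- pv_equiv track=rewrite | github.com/shamspias/cosmicexcuse | cosmicexcuse/analyzer.py | _pick_top_severity
-- ===== SOURCE A (Python) =====
-- from typing import Any, Dict, Iterable, List, Tuple
--
-- def _pick_top_severity(levels: Iterable[str]) -> str | None:
--     order = {"mild": 0, "medium": 1, "severe": 2}
--     top = -1
--     top_sev = None
--     for sev in levels:
--         val = order.get(sev, -1)
--         if val > top:
--             top = val
--             top_sev = sev
--     return top_sev
-- ===== SOURCE B (Python) =====
-- def _pick_top_severity(levels):
--     present = set(levels)
--     for sev in ("severe", "medium", "mild"):
--         if sev in present: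
--             return sev
--     return None
-- ===== Notes on version B (the rewrite author's own statement) =====
-- stated objective: idiomatic
-- what changed: Instead of scanning the input while tracking a running max rank, B builds a membership set once and probes the fixed priority list in descending order, returning the first severity present.
import Mathlib
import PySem

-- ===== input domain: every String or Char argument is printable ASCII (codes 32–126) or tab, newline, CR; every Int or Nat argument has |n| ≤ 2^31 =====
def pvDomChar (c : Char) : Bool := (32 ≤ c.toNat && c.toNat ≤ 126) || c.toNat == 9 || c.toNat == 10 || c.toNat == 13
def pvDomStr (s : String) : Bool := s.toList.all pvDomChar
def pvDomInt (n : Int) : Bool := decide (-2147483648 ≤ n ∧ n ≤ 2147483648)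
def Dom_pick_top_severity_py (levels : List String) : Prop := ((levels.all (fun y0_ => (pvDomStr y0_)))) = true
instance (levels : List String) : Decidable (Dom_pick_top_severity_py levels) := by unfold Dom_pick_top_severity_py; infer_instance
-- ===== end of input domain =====

-- B replaces A's running-max scan over the input by one membership set probed with the fixed priority list in descending order (idiomatic; same cost).

-- ===== PORT A =====
-- one step of A's loop body: val = order.get(sev, -1); if val > top: top, top_sev = val, sev
def pickStepA (order : PySem.Dict String Int) (s : Int × Option String) (sev : String) : Int × Option String :=
  let val := order.getD sev (-1)
  if val > s.1 then (val, some sev) else s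

def pick_top_severity_py (levels : List String) : Option String :=
  let order : PySem.Dict String Int := PySem.Dict.ofList [("mild", 0), ("medium", 1), ("severe", 2)]
  (levels.foldl (pickStepA order) ((-1 : Int), (none : Option String))).2

-- ===== PORT B =====
-- 'for sev in ("severe","medium","mild"): if sev in present: return sev' / 'return None'
def probeB (present : PySem.Set String) : List String → Option String
  | [] => none
  | sev :: rest => if PySem.Set.contains present sev then some sev else probeB present rest

def pick_top_severity_py_alt (levels : List String) : Option String :=
  let present : PySem.Set String := PySem.Set.ofList levels
  probeB present ["severe", "medium", "mild"]

-- ===== PRECONDITION & SPEC =====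
def Spec_pick_top_severity_py (levels : List String) (out : Option String) : Prop := out = pick_top_severity_py_alt levels
instance (levels : List String) (out : Option String) : Decidable (Spec_pick_top_severity_py levels out) := by unfold Spec_pick_top_severity_py; infer_instance

-- ===== CLAIM (what is proved, stated in full; the proofs are below) =====
def Claim_equal_pick_top_severity_py : Prop := ∀ (levels : List String), Dom_pick_top_severity_py levels → Spec_pick_top_severity_py levels (pick_top_severity_py levels)

-- ===== LEMMAS AND PROOFS =====

-- the literal dict of A
def pickOrder : PySem.Dict String Int := PySem.Dict.ofList [("mild", 0), ("medium", 1), ("severe", 2)]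

-- characterisation of A's fold from any of its four reachable states
theorem foldA_char (levels : List String) :
    ∀ s : Int × Option String,
      (s = ((-1 : Int), (none : Option String)) ∨ s = (0, some "mild") ∨ s = (1, some "medium") ∨ s = (2, some "severe")) →
      (levels.foldl (pickStepA pickOrder) s).2 =
        if "severe" ∈ levels ∨ s = (2, some "severe") then some "severe"
        else if "medium" ∈ levels ∨ s = (1, some "medium") then some "medium"
        else if "mild" ∈ levels ∨ s = (0, some "mild") then some "mild"
        else none := by
  induction levels with
  | nil =>
    intro s hs
    rcases hs with rfl | rfl | rfl | rfl <;> simp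
  | cons sev rest ih =>
    intro s hs
    by_cases h2 : sev = "severe"
    · subst h2
      have hstep : pickStepA pickOrder s ("severe") = (2, some "severe") := by
        rcases hs with rfl | rfl | rfl | rfl <;> decide
      simp only [List.foldl_cons, hstep, ih _ (Or.inr (Or.inr (Or.inr rfl)))]
      simp
    · by_cases h1 : sev = "medium"
      · subst h1
        rcases hs with rfl | rfl | rfl | rfl
        · have hstep : pickStepA pickOrder ((-1 : Int), (none : Option String)) "medium" = (1, some "medium") := by decide
          simp only [List.foldl_cons, hstep, ih _ (Or.inr (Or.inr (Or.inl rfl)))]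
          simp
        · have hstep : pickStepA pickOrder ((0 : Int), some "mild") "medium" = (1, some "medium") := by decide
          simp only [List.foldl_cons, hstep, ih _ (Or.inr (Or.inr (Or.inl rfl)))]
          simp
        · have hstep : pickStepA pickOrder ((1 : Int), some "medium") "medium" = (1, some "medium") := by decide
          simp only [List.foldl_cons, hstep, ih _ (Or.inr (Or.inr (Or.inl rfl)))]
          simp
        · have hstep : pickStepA pickOrder ((2 : Int), some "severe") "medium" = (2, some "severe") := by decide
          simp only [List.foldl_cons, hstep, ih _ (Or.inr (Or.inr (Or.inr rfl)))]
          simp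
      · by_cases h0 : sev = "mild"
        · subst h0
          rcases hs with rfl | rfl | rfl | rfl
          · have hstep : pickStepA pickOrder ((-1 : Int), (none : Option String)) "mild" = (0, some "mild") := by decide
            simp only [List.foldl_cons, hstep, ih _ (Or.inr (Or.inl rfl))]
            simp
          · have hstep : pickStepA pickOrder ((0 : Int), some "mild") "mild" = (0, some "mild") := by decide
            simp only [List.foldl_cons, hstep, ih _ (Or.inr (Or.inl rfl))]
            simp
          · have hstep : pickStepA pickOrder ((1 : Int), some "medium") "mild" = (1, some "medium") := by decide
            simp only [List.foldl_cons, hstep, ih _ (Or.inr (Or.inr (Or.inl rfl)))]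
            simp
          · have hstep : pickStepA pickOrder ((2 : Int), some "severe") "mild" = (2, some "severe") := by decide
            simp only [List.foldl_cons, hstep, ih _ (Or.inr (Or.inr (Or.inr rfl)))]
            simp
        · -- unknown severity: order.get(sev, -1) = -1, never beats top = -1
          have hstep : pickStepA pickOrder s sev = s := by
            have hget : pickOrder.getD sev (-1) = -1 := by
              have hrepr : pickOrder = PySem.Dict.mk [("mild", 0), ("medium", 1), ("severe", 2)] := by
                rfl
              rw [hrepr]
              simp [PySem.Dict.getD, PySem.Dict.get?,
                    Ne.symm h0, Ne.symm h1, Ne.symm h2]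
            rcases hs with rfl | rfl | rfl | rfl <;>
              simp [pickStepA, hget]
          simp only [List.foldl_cons, hstep, ih _ hs]
          rcases hs with rfl | rfl | rfl | rfl <;>
            simp [List.mem_cons, Ne.symm h2, Ne.symm h1, Ne.symm h0]

-- ===== VERDICT (by name: the statement is the Claim_ definition above) =====
theorem pick_top_severity_py_spec : Claim_equal_pick_top_severity_py := by
  intro levels _
  unfold Spec_pick_top_severity_py
  have h := foldA_char levels ((-1 : Int), (none : Option String)) (Or.inl rfl)
  simp only [pick_top_severity_py, pick_top_severity_py_alt, pickOrder] at h ⊢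
  rw [h]
  by_cases hsev : "severe" ∈ levels <;>
  by_cases hmed : "medium" ∈ levels <;>
  by_cases hmil : "mild" ∈ levels <;>
    simp [probeB, PySem.Set.contains, PySem.Set.mem_ofList, hsev, hmed, hmil]
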